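-- pv_equiv track=rewrite | github.com/AdityaJain1030/K4-free-graph-constructions | scripts/build_special_cayley.py | psl2_elements
-- ===== SOURCE A (Python) =====
-- from itertools import product, permutations
--
-- def _canonical_psl(A, q):
--     """Canonical form of A in PSL: min(A, -A) lex."""
--     (a, b), (c, d) = A
--     negA = (((-a) % q, (-b) % q), ((-c) % q, (-d) % q))
--     return min(A, negA)
--
-- def psl2_elements(q):
--     """Enumerate PSL(2, q) elements as canonical 2x2 matrices mod q."""
--     seen = set()
--     elts = []
--     for a, b, c, d in product(range(q), repeat=4):
--         if (a*d - b*c) % q != 1: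
--             continue
--         M = ((a, b), (c, d))
--         C = _canonical_psl(M, q)
--         if C in seen:
--             continue
--         seen.add(C)
--         elts.append(C)
--     return elts
-- ===== SOURCE B (Python) =====
-- from math import gcd
--
-- def _canon(a, b, c, d, q):
--     M = ((a, b), (c, d))
--     negM = (((-a) % q, (-b) % q), ((-c) % q, (-d) % q))
--     return M if M <= negM else negM
--
-- def psl2_elements(q):
--     """Enumerate PSL(2, q) canonical matrices by solving a*d = 1 + b*c (mod q)
--     for d directly, instead of scanning all q^4 quadruples."""
--     if q < 2:
--         return []
--     seen = set()
--     elts = []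
--     for a in range(q):
--         g = gcd(a, q)
--         qg = q // g
--         for b in range(q):
--             for c in range(q):
--                 r = (1 + b * c) % q
--                 if r % g != 0:
--                     continue
--                 d0 = (pow(a // g, -1, qg) * (r // g)) % qg
--                 for k in range(g):
--                     d = d0 + k * qg
--                     C = _canon(a, b, c, d, q)
--                     if C not in seen:
--                         seen.add(C)
--                         elts.append(C)
--     return elts
-- ===== Notes on version B (the rewrite author's own statement) =====
-- stated objective: faster
-- what changed: Instead of scanning all q^4 quadruples and testing det==1, B enumerates only (a,b,c) and solves the linear congruence a*d = 1+b*c (mod q) for d directly (gcd solvability test + modular inverse), emitting the gcd(a,q) solutions in increasing order, so the visitation order and hence the canonical-dedup output are identical.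
import Mathlib
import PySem

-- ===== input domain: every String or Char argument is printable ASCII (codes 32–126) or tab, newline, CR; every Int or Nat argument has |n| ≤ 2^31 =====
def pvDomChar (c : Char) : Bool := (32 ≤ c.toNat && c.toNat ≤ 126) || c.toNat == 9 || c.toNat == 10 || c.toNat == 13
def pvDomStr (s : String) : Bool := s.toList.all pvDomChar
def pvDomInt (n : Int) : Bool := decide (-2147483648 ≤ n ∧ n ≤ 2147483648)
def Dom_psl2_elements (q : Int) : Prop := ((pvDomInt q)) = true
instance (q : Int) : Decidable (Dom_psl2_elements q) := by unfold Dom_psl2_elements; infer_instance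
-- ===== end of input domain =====

-- B replaces A's O(q^4) scan over all quadruples by an O(q^3·log q) enumeration that
-- solves the linear congruence a*d ≡ 1+b*c (mod q) for d directly; same output.


-- ===== PORT A =====
-- Python's lexicographic '<' on ((a,b),(c,d)) tuples of ints
def pvLexLt (x y : (Int × Int) × (Int × Int)) : Bool :=
  if x.1.1 ≠ y.1.1 then decide (x.1.1 < y.1.1)
  else if x.1.2 ≠ y.1.2 then decide (x.1.2 < y.1.2)
  else if x.2.1 ≠ y.2.1 then decide (x.2.1 < y.2.1)
  else decide (x.2.2 < y.2.2)

def pvCanonicalPsl (A : (Int × Int) × (Int × Int)) (q : Int) : (Int × Int) × (Int × Int) :=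
  let negA : (Int × Int) × (Int × Int) :=
    ((PySem.Int.mod (-A.1.1) q, PySem.Int.mod (-A.1.2) q),
     (PySem.Int.mod (-A.2.1) q, PySem.Int.mod (-A.2.2) q))
  -- min(A, negA): the second argument wins only when strictly smaller
  if pvLexLt negA A then negA else A

def psl2_elements (q : Int) : List ((Int × Int) × (Int × Int)) :=
  let rng := PySem.List.pyRange 0 q
  let final := (rng.flatMap fun a => rng.flatMap fun b => rng.flatMap fun c => rng.map fun d => (a, b, c, d)).foldl
    (fun st (x : Int × Int × Int × Int) =>
      if PySem.Int.mod (x.1 * x.2.2.2 - x.2.1 * x.2.2.1) q ≠ 1 then st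
      else
        let C := pvCanonicalPsl ((x.1, x.2.1), (x.2.2.1, x.2.2.2)) q
        if PySem.Set.contains st.1 C then st
        else (PySem.Set.add st.1 C, st.2 ++ [C]))
    ((PySem.Set.empty : PySem.Set ((Int × Int) × (Int × Int))), ([] : List ((Int × Int) × (Int × Int))))
  final.2

-- ===== PORT B =====
-- Python's lexicographic '<=' on ((a,b),(c,d)) tuples of ints
def pvLexLe (x y : (Int × Int) × (Int × Int)) : Bool :=
  if x.1.1 ≠ y.1.1 then decide (x.1.1 < y.1.1)
  else if x.1.2 ≠ y.1.2 then decide (x.1.2 < y.1.2)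
  else if x.2.1 ≠ y.2.1 then decide (x.2.1 < y.2.1)
  else decide (x.2.2 ≤ y.2.2)

def pvCanonB (a b c d q : Int) : (Int × Int) × (Int × Int) :=
  let M : (Int × Int) × (Int × Int) := ((a, b), (c, d))
  let negM : (Int × Int) × (Int × Int) :=
    ((PySem.Int.mod (-a) q, PySem.Int.mod (-b) q), (PySem.Int.mod (-c) q, PySem.Int.mod (-d) q))
  if pvLexLe M negM then M else negM

-- pow(x, -1, m): Python returns THE unique modular inverse of x in [0, m) (exact here:
-- it is only ever called with gcd(x, m) = 1 and m > 0, where Bézout's gcdA gives that inverse)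
def pvInvMod (x m : Int) : Int := PySem.Int.mod (Int.gcdA x m) m

def psl2_elements_alt (q : Int) : List ((Int × Int) × (Int × Int)) :=
  if q < 2 then []
  else
    let rng := PySem.List.pyRange 0 q
    let final := rng.foldl (fun st a =>
      let g : Int := (Int.gcd a q : Int)
      let qg := PySem.Int.floordiv q g
      rng.foldl (fun st b =>
        rng.foldl (fun st c =>
          let r := PySem.Int.mod (1 + b * c) q
          if PySem.Int.mod r g ≠ 0 then st
          else
            let d0 := PySem.Int.mod (pvInvMod (PySem.Int.floordiv a g) qg * PySem.Int.floordiv r g) qg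
            (PySem.List.pyRange 0 g).foldl (fun st k =>
              let d := d0 + k * qg
              let C := pvCanonB a b c d q
              if PySem.Set.contains st.1 C then st
              else (PySem.Set.add st.1 C, st.2 ++ [C])) st) st) st)
      ((PySem.Set.empty : PySem.Set ((Int × Int) × (Int × Int))), ([] : List ((Int × Int) × (Int × Int))))
    final.2

-- ===== PRECONDITION & SPEC =====
def Spec_psl2_elements (q : Int) (out : List ((Int × Int) × (Int × Int))) : Prop := out = psl2_elements_alt q
instance (q : Int) (out : List ((Int × Int) × (Int × Int))) : Decidable (Spec_psl2_elements q out) := by unfold Spec_psl2_elements; infer_instance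

-- ===== CLAIM (what is proved, stated in full; the proofs are below) =====
def Claim_equal_psl2_elements : Prop := ∀ (q : Int), Dom_psl2_elements q → Spec_psl2_elements q (psl2_elements q)

-- ===== LEMMAS AND PROOFS =====

-- the shared seen/append step on quadruples (proof-side abbreviation of both loop bodies)
def pvStep (q : Int) (st : PySem.Set ((Int × Int) × (Int × Int)) × List ((Int × Int) × (Int × Int)))
    (x : Int × Int × Int × Int) : PySem.Set ((Int × Int) × (Int × Int)) × List ((Int × Int) × (Int × Int)) :=
  let C := pvCanonicalPsl ((x.1, x.2.1), (x.2.2.1, x.2.2.2)) q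
  if PySem.Set.contains st.1 C then st else (PySem.Set.add st.1 C, st.2 ++ [C])

-- B's list of solutions d of a*d ≡ 1+b*c (mod q) in increasing order (proof-side)
def pvSolList (a b c q : Int) : List Int :=
  let g : Int := (Int.gcd a q : Int)
  let r := PySem.Int.mod (1 + b * c) q
  if PySem.Int.mod r g ≠ 0 then []
  else
    let qg := PySem.Int.floordiv q g
    let d0 := PySem.Int.mod (pvInvMod (PySem.Int.floordiv a g) qg * PySem.Int.floordiv r g) qg
    (PySem.List.pyRange 0 g).map (fun k => d0 + k * qg)

theorem pvStep1 (u v : Int) (s t : Bool) (h : s = !t) :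
    (if u ≠ v then decide (u < v) else s) = !(if v ≠ u then decide (v < u) else t) := by
  by_cases huv : u = v
  · subst huv; simp [h]
  · rw [if_pos huv, if_pos (Ne.symm huv), ← decide_not, decide_eq_decide]
    omega

theorem pvLexLe_eq (x y : (Int × Int) × (Int × Int)) : pvLexLe x y = !pvLexLt y x := by
  simp only [pvLexLe, pvLexLt]
  apply pvStep1; apply pvStep1; apply pvStep1
  rw [← decide_not, decide_eq_decide]; omega

lemma pvIteFlip {α : Type} (x : Bool) (M N : α) :
    (if (!x) = true then M else N) = (if x = true then N else M) := by
  cases x <;> simp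

lemma pvCanonB_eq (a b c d q : Int) : pvCanonB a b c d q = pvCanonicalPsl ((a, b), (c, d)) q := by
  simp only [pvCanonB, pvCanonicalPsl, pvLexLe_eq]
  exact pvIteFlip _ _ _

theorem pvRange_pairwise (q : Int) : (PySem.List.pyRange 0 q).Pairwise (· < ·) := by
  by_cases h : q ≤ 0
  · rw [PySem.List.pyRange_one_eq_nil h]; exact List.Pairwise.nil
  · have : q = ((q.toNat : Nat) : Int) := by omega
    rw [this, PySem.List.pyRange_zero_natCast, List.pairwise_map]
    exact (List.pairwise_lt_range).imp (by intro a b hab; exact_mod_cast hab)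

theorem pvFilter_eq_solList (a b c q : Int) (hq : 2 ≤ q) :
    (PySem.List.pyRange 0 q).filter (fun d => decide (PySem.Int.mod (a * d - b * c) q = 1)) =
      pvSolList a b c q := by
  have hq0 : 0 < q := by omega
  set g : Int := (Int.gcd a q : Int) with hgdef
  have hg0 : 0 < g := by
    have h1 : Int.gcd a q ≠ 0 := by simp [Int.gcd_eq_zero_iff]; omega
    omega
  have hga : g ∣ a := by rw [hgdef]; exact Int.gcd_dvd_left a q
  have hgq : g ∣ q := by rw [hgdef]; exact Int.gcd_dvd_right a q
  set r : Int := (1 + b * c) % q with hrdef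
  have hr0 : 0 ≤ r := Int.emod_nonneg _ (by omega)
  have hrq : r < q := Int.emod_lt_of_pos _ hq0
  set qg : Int := q / g with hqgdef
  have hqqg : g * qg = q := Int.mul_ediv_cancel' hgq
  have hqg0 : 0 < qg := by nlinarith
  -- the det condition is the congruence a*d ≡ r (mod q)
  have hcond : ∀ d : Int, (PySem.Int.mod (a * d - b * c) q = 1) ↔ q ∣ a * d - r := by
    intro d
    rw [PySem.Int.mod_eq_emod_of_pos hq0]
    have hdiv := Int.mul_ediv_add_emod (a * d - b * c) q
    have h3 := Int.mul_ediv_add_emod (1 + b * c) q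
    constructor
    · intro h
      exact ⟨(a * d - b * c) / q + (1 + b * c) / q, by linear_combination -hdiv - h3 + h - hrdef⟩
    · rintro ⟨t, ht⟩
      have he : a * d - b * c = 1 + q * (t - (1 + b * c) / q) := by linear_combination ht + h3 + hrdef
      rw [he, Int.add_mul_emod_self_left]
      exact Int.emod_eq_of_lt (by norm_num) (by omega)
  -- unfold pvSolList into emod/ediv form
  have hsol : pvSolList a b c q =
      if r % g ≠ 0 then []
      else (PySem.List.pyRange 0 g).map
        (fun k => (pvInvMod (a / g) qg * (r / g)) % qg + k * qg) := by
    rw [pvSolList]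
    simp only [PySem.Int.mod_eq_emod_of_pos hq0, PySem.Int.mod_eq_emod_of_pos hg0,
      PySem.Int.mod_eq_emod_of_pos hqg0, PySem.Int.floordiv_eq_ediv_of_pos hg0,
      ← hgdef, ← hrdef, ← hqgdef]
  rw [hsol]
  by_cases hgr : g ∣ r
  · rw [if_neg (by simpa using Int.emod_eq_zero_of_dvd hgr)]
    set a' : Int := a / g with ha'def
    set r' : Int := r / g with hr'def
    set inv : Int := pvInvMod a' qg with hinvdef
    set d0 : Int := (inv * r') % qg with hd0def
    have ha : g * a' = a := Int.mul_ediv_cancel' hga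
    have hrr : g * r' = r := Int.mul_ediv_cancel' hgr
    have hd00 : 0 ≤ d0 := Int.emod_nonneg _ (by omega)
    have hd0q : d0 < qg := Int.emod_lt_of_pos _ hqg0
    -- Bezout inverse
    have hcop : Int.gcd a' qg = 1 := by
      rw [ha'def, hqgdef, hgdef]
      exact Int.gcd_div_gcd_div_gcd (by omega)
    have hinv : qg ∣ a' * inv - 1 := by
      have hbez := Int.gcd_eq_gcd_ab a' qg
      rw [hcop] at hbez
      have hmod : inv = Int.gcdA a' qg - qg * (Int.gcdA a' qg / qg) := by
        rw [hinvdef, pvInvMod, PySem.Int.mod_eq_emod_of_pos hqg0, Int.emod_def]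
      exact ⟨-(Int.gcdB a' qg) - a' * (Int.gcdA a' qg / qg), by
        push_cast at hbez
        linear_combination a' * hmod - hbez⟩
    obtain ⟨t2, ht2⟩ := hinv
    have hD : d0 = inv * r' - qg * (inv * r' / qg) := by
      rw [hd0def]; exact Int.emod_def _ _
    -- key: solutions of the congruence are exactly d ≡ d0 (mod qg)
    have hkey : ∀ d : Int, (q ∣ a * d - r) ↔ qg ∣ d - d0 := by
      intro d
      have hfac : a * d - r = g * (a' * d - r') := by rw [← ha, ← hrr]; ring
      rw [hfac, ← hqqg, mul_dvd_mul_iff_left (by omega : g ≠ 0)]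
      constructor
      · rintro ⟨t1, ht1⟩
        exact ⟨inv * t1 - d * t2 + inv * r' / qg, by
          linear_combination inv * ht1 - d * ht2 - hD⟩
      · rintro ⟨t, ht⟩
        exact ⟨t2 * r' + a' * t - a' * (inv * r' / qg), by
          linear_combination r' * ht2 + a' * ht + a' * hD⟩
    -- both sides are strictly increasing lists with the same members
    have hL2mono : ((PySem.List.pyRange 0 g).map (fun k => d0 + k * qg)).Pairwise (· < ·) := by
      rw [List.pairwise_map]
      exact (pvRange_pairwise g).imp (by
        intro k k' hk
        have := mul_lt_mul_of_pos_right hk hqg0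
        omega)
    have hL1pw : ((PySem.List.pyRange 0 q).filter
        (fun d => decide (PySem.Int.mod (a * d - b * c) q = 1))).Pairwise (· < ·) :=
      (pvRange_pairwise q).filter _
    have hmem : ∀ d : Int,
        d ∈ (PySem.List.pyRange 0 q).filter (fun d => decide (PySem.Int.mod (a * d - b * c) q = 1)) ↔
        d ∈ (PySem.List.pyRange 0 g).map (fun k => d0 + k * qg) := by
      intro d
      rw [List.mem_filter, List.mem_map]
      simp only [PySem.List.mem_pyRange_one, decide_eq_true_eq]
      rw [hcond d, hkey d]
      constructor
      · rintro ⟨⟨hd0', hdq⟩, k, hk⟩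
        refine ⟨k, ⟨?_, ?_⟩, by linarith⟩
        · nlinarith
        · nlinarith
      · rintro ⟨k, ⟨hk0, hkg⟩, hdk⟩
        refine ⟨⟨?_, ?_⟩, ⟨k, by linarith⟩⟩
        · nlinarith
        · nlinarith
    exact PySem.List.eq_of_perm_of_pairwise_le_of_injective (fun x => x) Function.injective_id
      ((List.perm_ext_iff_of_nodup (hL1pw.imp ne_of_lt) (hL2mono.imp ne_of_lt)).mpr hmem)
      (hL1pw.imp le_of_lt) (hL2mono.imp le_of_lt)
  · rw [if_pos (fun h => hgr (Int.dvd_of_emod_eq_zero h))]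
    rw [List.filter_eq_nil_iff]
    intro d _
    simp only [decide_eq_true_eq, hcond d]
    intro hdvd
    exact hgr (by
      have h1 : g ∣ a * d - r := dvd_trans hgq hdvd
      have h2 : g ∣ a * d := Dvd.dvd.mul_right hga d
      have := dvd_sub h2 h1
      simpa using this)

lemma pvA_eq (q : Int) :
    psl2_elements q =
      ((PySem.List.pyRange 0 q).foldl (fun st a => (PySem.List.pyRange 0 q).foldl (fun st b =>
        (PySem.List.pyRange 0 q).foldl (fun st c =>
          (((PySem.List.pyRange 0 q).filter (fun d => decide (PySem.Int.mod (a * d - b * c) q = 1))).foldl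
            (fun st d => pvStep q st (a, b, c, d)) st)) st) st)
        ((PySem.Set.empty : PySem.Set ((Int × Int) × (Int × Int))), ([] : List ((Int × Int) × (Int × Int))))).2 := by
  simp only [psl2_elements, ne_eq, ite_not]
  rw [PySem.List.foldl_ite_eq_foldl_filter]
  simp only [List.filter_flatMap, List.filter_map, List.foldl_flatMap, List.foldl_map]
  rfl

lemma pvB_eq (q : Int) (hq : 2 ≤ q) :
    psl2_elements_alt q =
      ((PySem.List.pyRange 0 q).foldl (fun st a => (PySem.List.pyRange 0 q).foldl (fun st b =>
        (PySem.List.pyRange 0 q).foldl (fun st c =>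
          ((pvSolList a b c q).foldl (fun st d => pvStep q st (a, b, c, d)) st)) st) st)
        ((PySem.Set.empty : PySem.Set ((Int × Int) × (Int × Int))), ([] : List ((Int × Int) × (Int × Int))))).2 := by
  unfold psl2_elements_alt
  rw [if_neg (by omega)]
  refine congrArg Prod.snd ?_
  apply PySem.List.foldl_congr_mem
  intro st a _
  apply PySem.List.foldl_congr_mem
  intro st b _
  apply PySem.List.foldl_congr_mem
  intro st c _
  rw [pvSolList]
  by_cases h : PySem.Int.mod (PySem.Int.mod (1 + b * c) q) ((Int.gcd a q : Int)) ≠ 0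
  · rw [if_pos h, if_pos h]; rfl
  · rw [if_neg h, if_neg h, List.foldl_map]
    apply PySem.List.foldl_congr_mem
    intro st k _
    simp [pvStep, pvCanonB_eq]

-- ===== VERDICT (by name: the statement is the Claim_ definition above) =====
theorem psl2_elements_spec : Claim_equal_psl2_elements := by
  intro q _
  unfold Spec_psl2_elements
  by_cases hq : q < 2
  · have hb : psl2_elements_alt q = [] := by rw [psl2_elements_alt, if_pos hq]
    rw [hb]
    by_cases h0 : q ≤ 0
    · rw [psl2_elements]
      simp [PySem.List.pyRange_one_eq_nil h0]
    · have h1 : q = 1 := by omega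
      subst h1
      decide
  · rw [pvA_eq, pvB_eq q (by omega)]
    refine congrArg Prod.snd ?_
    apply PySem.List.foldl_congr_mem
    intro st a _
    apply PySem.List.foldl_congr_mem
    intro st b _
    apply PySem.List.foldl_congr_mem
    intro st c _
    rw [pvFilter_eq_solList a b c q (by omega)]
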